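-- pv_equiv track=rewrite | github.com/YvesNDIKURIYO-2022/hybrid-memetic-framework-threat-aware | File 2-Hybrid Memetic on A-n32-k5 Instance.py | decode_routes
-- ===== SOURCE A (Python) =====
-- demands = [
--     0, 19, 21, 6, 19, 7, 12, 16, 6, 16, 8,
--     14, 21, 16, 3, 22, 18, 19, 1, 24, 8, 5
-- ]
--
-- capacity = 100
--
-- max_vehicles = 3
--
-- def decode_routes(permutation, demands, capacity, max_vehicles):
--     valid_customers = [i for i in permutation if 1 <= i < len(demands)]
--     if not valid_customers:
--         return [[0, 0]]
--     routes, route, load = [], [0], 0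
--     for cust in valid_customers:
--         if load + demands[cust] <= capacity:
--             route.append(cust)
--             load += demands[cust]
--         else:
--             route.append(0)
--             routes.append(route)
--             route, load = [0, cust], demands[cust]
--     route.append(0)
--     routes.append(route)
--     while len(routes) > max_vehicles and len(routes) >= 2:
--         last = routes.pop()
--         routes[-1] = routes[-1][:-1] + last[1:]
--     routes = [r for r in routes if len(r) > 2]
--     return routes if routes else [[0, 0]]
-- ===== SOURCE B (Python) =====
-- def decode_routes(permutation, demands, capacity, max_vehicles):
--     valid = [c for c in permutation if 1 <= c < len(demands)]
--     if not valid: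
--         return [[0, 0]]
--     # pass 1: record only the positions where a new route must start (no route lists built)
--     cuts, load = [], 0
--     for k, c in enumerate(valid):
--         if load + demands[c] > capacity:
--             cuts.append(k)
--             load = demands[c]
--         else:
--             load += demands[c]
--     # pass 2: slice the customer sequence at the recorded boundaries
--     bounds = [0] + cuts + [len(valid)]
--     groups = [valid[i:j] for i, j in zip(bounds, bounds[1:])]
--     # collapse the overflowing tail in one splice
--     if len(groups) > max(max_vehicles, 1):
--         k = max(max_vehicles - 1, 0)
--         groups = groups[:k] + [[c for g in groups[k:] for c in g]]
--     routes = [[0, *g, 0] for g in groups if g]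
--     return routes or [[0, 0]]
-- ===== Notes on version B (the rewrite author's own statement) =====
-- stated objective: alternative
-- what changed: B never builds routes during the scan: a first pass records only the cut positions (indices where a new route must start) with an integer load accumulator, a second pass materialises the groups by slicing the customer list at the zipped boundary pairs, the tail overflow is collapsed by one closed-form splice instead of A's iterative pop-and-rewrite loop, and the depot sentinels are attached only in the final formatting comprehension.
import Mathlib
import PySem

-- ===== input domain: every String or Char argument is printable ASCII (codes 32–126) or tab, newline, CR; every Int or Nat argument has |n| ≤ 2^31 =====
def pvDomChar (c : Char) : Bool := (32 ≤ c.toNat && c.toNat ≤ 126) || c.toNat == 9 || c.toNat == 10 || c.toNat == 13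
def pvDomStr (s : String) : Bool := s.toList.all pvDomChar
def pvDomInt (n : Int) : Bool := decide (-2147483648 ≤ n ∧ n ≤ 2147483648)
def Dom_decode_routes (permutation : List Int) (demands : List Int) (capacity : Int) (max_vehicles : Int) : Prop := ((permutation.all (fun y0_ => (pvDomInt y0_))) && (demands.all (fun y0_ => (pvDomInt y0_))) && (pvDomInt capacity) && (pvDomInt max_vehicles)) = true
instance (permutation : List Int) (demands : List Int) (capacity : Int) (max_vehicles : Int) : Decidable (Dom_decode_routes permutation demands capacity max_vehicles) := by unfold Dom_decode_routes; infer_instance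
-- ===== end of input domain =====

-- B records only the cut positions in a first pass, materialises the routes by slicing at the
-- zipped boundary pairs, and collapses the tail overflow in one closed-form splice (objective: alternative).


-- ===== PORT A =====
-- loop body of A's for-loop (state = (routes, route, load)); demands[cust] is in range
-- whenever cust passed the validity filter, so pyGetD's default is never used
def pvStepA (demands : List Int) (capacity : Int)
    (s : List (List Int) × List Int × Int) (cust : Int) : List (List Int) × List Int × Int :=
  if s.2.2 + PySem.List.pyGetD demands cust 0 ≤ capacity then
    (s.1, s.2.1 ++ [cust], s.2.2 + PySem.List.pyGetD demands cust 0)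
  else
    (s.1 ++ [s.2.1 ++ [0]], [0, cust], PySem.List.pyGetD demands cust 0)

-- A's while-loop: last = routes.pop(); routes[-1] = routes[-1][:-1] + last[1:]
-- ([:-1] = dropLast and [1:] = tail, exact on any list)
def pvMergeA (max_vehicles : Int) (routes : List (List Int)) : List (List Int) :=
  if _h : (routes.length : Int) > max_vehicles ∧ routes.length ≥ 2 then
    pvMergeA max_vehicles
      (routes.dropLast.dropLast ++ [(routes.dropLast.getLastD []).dropLast ++ (routes.getLastD []).tail])
  else routes
termination_by routes.length
decreasing_by simp [List.length_dropLast]; omega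

def decode_routes (permutation : List Int) (demands : List Int) (capacity : Int) (max_vehicles : Int) : List (List Int) :=
  let valid_customers := permutation.filter (fun i => decide (1 ≤ i) && decide (i < (demands.length : Int)))
  if valid_customers = [] then [[0, 0]]
  else
    let st := valid_customers.foldl (pvStepA demands capacity) ([], [0], 0)
    let routes := st.1 ++ [st.2.1 ++ [0]]
    let routes := pvMergeA max_vehicles routes
    let routes := routes.filter (fun r => decide (r.length > 2))
    if routes = [] then [[0, 0]] else routes

-- ===== PORT B =====
-- pass-1 loop body (state = (cuts, load)), run over enumerate(valid)
def pvCutStep (demands : List Int) (capacity : Int)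
    (s : List Int × Int) (kc : Int × Int) : List Int × Int :=
  if s.2 + PySem.List.pyGetD demands kc.2 0 > capacity then
    (s.1 ++ [kc.1], PySem.List.pyGetD demands kc.2 0)
  else
    (s.1, s.2 + PySem.List.pyGetD demands kc.2 0)

def decode_routes_alt (permutation : List Int) (demands : List Int) (capacity : Int) (max_vehicles : Int) : List (List Int) :=
  let valid := permutation.filter (fun i => decide (1 ≤ i) && decide (i < (demands.length : Int)))
  if valid = [] then [[0, 0]]
  else
    let cuts := ((PySem.List.enumerate valid 0).foldl (pvCutStep demands capacity) ([], 0)).1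
    -- bounds[1:] = bounds.tail (exact); zip(bounds, bounds[1:]) driving the slicing comprehension = zipWith
    let bounds : List Int := 0 :: cuts ++ [(valid.length : Int)]
    let groups := List.zipWith (fun i j => PySem.List.slice valid (some i) (some j)) bounds bounds.tail
    let groups := if (groups.length : Int) > max max_vehicles 1 then
        let k : Int := max (max_vehicles - 1) 0
        -- [c for g in groups[k:] for c in g] = flatten (exact)
        PySem.List.slice groups none (some k) ++ [(PySem.List.slice groups (some k) none).flatten]
      else groups
    let routes := (groups.filter (fun g => !g.isEmpty)).map (fun g => 0 :: (g ++ [0]))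
    if routes = [] then [[0, 0]] else routes

-- ===== PRECONDITION & SPEC =====
def Spec_decode_routes (permutation : List Int) (demands : List Int) (capacity : Int) (max_vehicles : Int) (out : List (List Int)) : Prop := out = decode_routes_alt permutation demands capacity max_vehicles
instance (permutation : List Int) (demands : List Int) (capacity : Int) (max_vehicles : Int) (out : List (List Int)) : Decidable (Spec_decode_routes permutation demands capacity max_vehicles out) := by unfold Spec_decode_routes; infer_instance

-- ===== CLAIM (what is proved, stated in full; the proofs are below) =====
def Claim_equal_decode_routes : Prop := ∀ (permutation : List Int) (demands : List Int) (capacity : Int) (max_vehicles : Int), Dom_decode_routes permutation demands capacity max_vehicles → Spec_decode_routes permutation demands capacity max_vehicles (decode_routes permutation demands capacity max_vehicles)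

-- ===== LEMMAS AND PROOFS =====
-- route formatting: a customer group g becomes the route [0, *g, 0]
def pvFmt (g : List Int) : List Int := 0 :: (g ++ [0])

-- common abstraction: the greedy grouping both programs compute, as structural recursion
def pvGroupRec (demands : List Int) (cap : Int) : List Int → List Int → Int → List (List Int)
  | [], cur, _ => [cur]
  | c :: vs, cur, load =>
    if load + PySem.List.pyGetD demands c 0 ≤ cap then
      pvGroupRec demands cap vs (cur ++ [c]) (load + PySem.List.pyGetD demands c 0)
    else
      cur :: pvGroupRec demands cap vs [c] (PySem.List.pyGetD demands c 0)

-- B's cut positions, as structural recursion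
def pvCutsRec (demands : List Int) (cap : Int) : List Int → Int → Int → List Int
  | [], _, _ => []
  | c :: vs, load, k =>
    if load + PySem.List.pyGetD demands c 0 > cap then
      k :: pvCutsRec demands cap vs (PySem.List.pyGetD demands c 0) (k + 1)
    else
      pvCutsRec demands cap vs (load + PySem.List.pyGetD demands c 0) (k + 1)

-- slicing a list at absolute cut positions (i = absolute position of xs' head)
def pvSlicesAux : List Int → List Int → Int → List (List Int)
  | xs, [], _ => [xs]
  | xs, c :: cs, i => xs.take (c - i).toNat :: pvSlicesAux (xs.drop (c - i).toNat) cs c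

-- one tail-merge step, on customer groups
def pvStepG (G : List (List Int)) : List (List Int) :=
  G.dropLast.dropLast ++ [G.dropLast.getLastD [] ++ G.getLastD []]

def pvMergeG (max_vehicles : Int) (G : List (List Int)) : List (List Int) :=
  if _h : (G.length : Int) > max_vehicles ∧ G.length ≥ 2 then
    pvMergeG max_vehicles (pvStepG G)
  else G
termination_by G.length
decreasing_by simp [pvStepG, List.length_dropLast]; omega

lemma pvDecomp2 (G : List (List Int)) (h : 2 ≤ G.length) :
    ∃ l a b, G = l ++ [a, b] := by
  match hr : G.reverse with
  | [] => simp at hr; simp [hr] at h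
  | [a] => have : G = [a] := by simpa using congrArg List.reverse hr
           simp [this] at h
  | b :: a :: l =>
      refine ⟨l.reverse, a, b, ?_⟩
      have := congrArg List.reverse hr
      simpa using this

lemma pvMergeA_fmt (mv : Int) (G : List (List Int)) :
    pvMergeA mv (G.map pvFmt) = (pvMergeG mv G).map pvFmt := by
  induction G using pvMergeG.induct (max_vehicles := mv) with
  | case1 G h ih =>
      obtain ⟨l, a, b, rfl⟩ := pvDecomp2 G h.2
      rw [pvMergeA, dif_pos (by simpa using h), pvMergeG, dif_pos h, ← ih]
      congr 1
      simp [pvStepG, pvFmt]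
      rw [show (0 : Int) :: (a ++ [0]) = ((0 : Int) :: a) ++ [0] from by simp,
        List.dropLast_concat]
      simp
  | case2 G h =>
      rw [pvMergeA, dif_neg (by simpa using h), pvMergeG, dif_neg h]

lemma pvMergeG_closed (mv : Int) (G : List (List Int))
    (h : (G.length : Int) > mv ∧ G.length ≥ 2) :
    pvMergeG mv G = G.take (mv - 1).toNat ++ [(G.drop (mv - 1).toNat).flatten] := by
  revert h
  induction G using pvMergeG.induct (max_vehicles := mv) with
  | case1 G h ih =>
      intro hG
      obtain ⟨l, a, b, rfl⟩ := pvDecomp2 G h.2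
      have hstep : pvStepG (l ++ [a, b]) = l ++ [a ++ b] := by
        simp [pvStepG]
      rw [pvMergeG, dif_pos h, hstep]
      rw [hstep] at ih
      have hlen : ((l.length : Int) + 2) > mv := by
        simpa [List.length_append] using hG.1
      have hk : (mv - 1).toNat ≤ l.length := by omega
      by_cases hs : ((l ++ [a ++ b]).length : Int) > mv ∧ (l ++ [a ++ b]).length ≥ 2
      · rw [ih hs]
        rw [List.take_append_of_le_length hk, List.take_append_of_le_length hk,
          List.drop_append_of_le_length hk, List.drop_append_of_le_length hk]
        simp
      · rw [pvMergeG, dif_neg hs]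
        simp only [List.length_append, List.length_cons, List.length_nil] at hs
        rcases not_and_or.mp hs with hs1 | hs2
        · have hkl : (mv - 1).toNat = l.length := by omega
          rw [hkl, List.take_left, List.drop_left]
          simp
        · have hl : l = [] := by
            have := List.length_eq_zero_iff.mp (by omega : l.length = 0)
            exact this
          subst hl
          have hk0 : (mv - 1).toNat = 0 := by
            simp at hlen
            omega
          simp [hk0]
  | case2 G h =>
      intro hG
      exact absurd hG h

-- A's fold equals the abstract grouping, routes being formatted groups
lemma pvFoldA_groupRec (demands : List Int) (cap : Int) :
    ∀ (vs : List Int) (G : List (List Int)) (cur : List Int) (load : Int),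
      (vs.foldl (pvStepA demands cap) (G.map pvFmt, 0 :: cur, load)).1 ++
          [(vs.foldl (pvStepA demands cap) (G.map pvFmt, 0 :: cur, load)).2.1 ++ [0]] =
        (G ++ pvGroupRec demands cap vs cur load).map pvFmt := by
  intro vs
  induction vs with
  | nil => intro G cur load; simp [pvGroupRec, pvFmt]
  | cons c vs ih =>
      intro G cur load
      simp only [List.foldl_cons, pvStepA, pvGroupRec]
      by_cases h : load + PySem.List.pyGetD demands c 0 ≤ cap
      · rw [if_pos h, if_pos h]
        have := ih G (cur ++ [c]) (load + PySem.List.pyGetD demands c 0)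
        simpa using this
      · rw [if_neg h, if_neg h]
        have := ih (G ++ [cur]) [c] (PySem.List.pyGetD demands c 0)
        simp only [List.map_append] at this ⊢
        simpa [pvFmt] using this

-- B's pass-1 fold equals the recursive cut computation
lemma pvFoldCuts (demands : List Int) (cap : Int) :
    ∀ (vs : List Int) (cuts0 : List Int) (load k : Int),
      ((PySem.List.enumerate vs k).foldl (pvCutStep demands cap) (cuts0, load)).1 =
        cuts0 ++ pvCutsRec demands cap vs load k := by
  intro vs
  induction vs with
  | nil => intro cuts0 load k; simp [PySem.List.enumerate_nil, pvCutsRec]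
  | cons c vs ih =>
      intro cuts0 load k
      rw [PySem.List.enumerate_cons]
      simp only [List.foldl_cons, pvCutStep, pvCutsRec]
      by_cases h : load + PySem.List.pyGetD demands c 0 > cap
      · rw [if_pos h, if_pos h]
        simpa using ih (cuts0 ++ [k]) (PySem.List.pyGetD demands c 0) (k + 1)
      · rw [if_neg h, if_neg h]
        exact ih cuts0 (load + PySem.List.pyGetD demands c 0) (k + 1)

lemma pvCutsRec_ge (demands : List Int) (cap : Int) :
    ∀ (vs : List Int) (load k : Int), ∀ c ∈ pvCutsRec demands cap vs load k, k ≤ c := by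
  intro vs
  induction vs with
  | nil => intro load k c hc; simp [pvCutsRec] at hc
  | cons x vs ih =>
      intro load k c hc
      simp only [pvCutsRec] at hc
      split_ifs at hc with h
      · rcases List.mem_cons.mp hc with rfl | hc
        · exact le_refl _
        · have := ih _ (k + 1) c hc; omega
      · have := ih _ (k + 1) c hc; omega

lemma pvCutsRec_pairwise (demands : List Int) (cap : Int) :
    ∀ (vs : List Int) (load k : Int), List.Pairwise (· ≤ ·) (pvCutsRec demands cap vs load k) := by
  intro vs
  induction vs with
  | nil => intro load k; simp [pvCutsRec]
  | cons x vs ih =>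
      intro load k
      simp only [pvCutsRec]
      split_ifs with h
      · rw [List.pairwise_cons]
        refine ⟨?_, ih _ (k + 1)⟩
        intro y hy
        have := pvCutsRec_ge demands cap vs _ (k + 1) y hy
        omega
      · exact ih _ (k + 1)

lemma pvGroupRec_modifyHead (demands : List Int) (cap : Int) :
    ∀ (vs : List Int) (x : Int) (cur : List Int) (load : Int),
      pvGroupRec demands cap vs (x :: cur) load =
        (pvGroupRec demands cap vs cur load).modifyHead (x :: ·) := by
  intro vs
  induction vs with
  | nil => intro x cur load; simp [pvGroupRec]
  | cons c vs ih =>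
      intro x cur load
      simp only [pvGroupRec]
      split_ifs with h
      · have := ih x (cur ++ [c]) (load + PySem.List.pyGetD demands c 0)
        simpa using this
      · simp

lemma pvSlicesAux_cons (x : Int) (xs : List Int) :
    ∀ (cs : List Int) (i : Int), (∀ c ∈ cs, i + 1 ≤ c) →
      pvSlicesAux (x :: xs) cs i = (pvSlicesAux xs cs (i + 1)).modifyHead (x :: ·) := by
  intro cs i hcs
  cases cs with
  | nil => simp [pvSlicesAux]
  | cons c cs =>
      have hc : i + 1 ≤ c := hcs c (List.mem_cons_self ..)
      have h1 : (c - i).toNat = (c - (i + 1)).toNat + 1 := by omega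
      simp only [pvSlicesAux, h1, List.take_succ_cons, List.drop_succ_cons, List.modifyHead]

-- slicing at the recursive cuts reproduces the abstract grouping
lemma pvSlices_cuts (demands : List Int) (cap : Int) :
    ∀ (vs : List Int) (load i : Int),
      pvSlicesAux vs (pvCutsRec demands cap vs load i) i = pvGroupRec demands cap vs [] load := by
  intro vs
  induction vs with
  | nil => intro load i; simp [pvCutsRec, pvGroupRec, pvSlicesAux]
  | cons c vs ih =>
      intro load i
      simp only [pvCutsRec, pvGroupRec]
      by_cases h : load + PySem.List.pyGetD demands c 0 ≤ cap
      · rw [if_neg (by omega), if_pos h]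
        rw [pvSlicesAux_cons c vs _ i (fun c' hc' => pvCutsRec_ge demands cap vs _ (i + 1) c' hc'),
          ih _ (i + 1), ← pvGroupRec_modifyHead]
        simp
      · rw [if_pos (by omega), if_neg h]
        have h0 : (i - i).toNat = 0 := by omega
        simp only [pvSlicesAux, h0, List.take_zero, List.drop_zero]
        rw [pvSlicesAux_cons c vs _ i (fun c' hc' => pvCutsRec_ge demands cap vs _ (i + 1) c' hc'),
          ih _ (i + 1), ← pvGroupRec_modifyHead]

-- the zipped boundary slices are exactly pvSlicesAux
lemma pvZip_slices (full : List Int) :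
    ∀ (cs : List Int) (i : Int), 0 ≤ i → List.Pairwise (· ≤ ·) (i :: cs) →
      List.zipWith (fun a b => PySem.List.slice full (some a) (some b))
          (i :: cs ++ [(full.length : Int)]) (cs ++ [(full.length : Int)]) =
        pvSlicesAux (full.drop i.toNat) cs i := by
  intro cs
  induction cs with
  | nil =>
      intro i hi _
      simp only [List.nil_append, List.singleton_append, List.zipWith_cons_cons,
        List.zipWith_nil_right, pvSlicesAux]
      rw [PySem.List.slice_toNat full hi (by positivity)]
      congr 1
      refine List.take_of_length_le ?_
      simp only [List.length_drop]
      omega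
  | cons c cs ih =>
      intro i hi hp
      rcases List.pairwise_cons.mp hp with ⟨h1, h2⟩
      have hc : i ≤ c := h1 c (List.mem_cons_self ..)
      have hc0 : (0 : Int) ≤ c := le_trans hi hc
      simp only [List.cons_append, List.zipWith_cons_cons, pvSlicesAux]
      congr 1
      · rw [PySem.List.slice_toNat full hi hc0]
        congr 1
        omega
      · have hd : (full.drop i.toNat).drop (c - i).toNat = full.drop c.toNat := by
          rw [List.drop_drop]
          congr 1
          omega
        rw [hd]
        exact ih c hc0 h2

lemma pvFilter_fmt (X : List (List Int)) :
    (X.map pvFmt).filter (fun r => decide (r.length > 2)) =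
      (X.filter (fun g => !g.isEmpty)).map pvFmt := by
  induction X with
  | nil => rfl
  | cons g X ih =>
      simp only [List.map_cons, List.filter_cons]
      have : (decide ((pvFmt g).length > 2)) = !g.isEmpty := by
        cases g <;> simp [pvFmt]
      rw [this]
      cases hg : g.isEmpty <;> simp [ih]

-- ===== VERDICT (by name: the statement is the Claim_ definition above) =====
theorem decode_routes_spec : Claim_equal_decode_routes := by
  intro permutation demands capacity max_vehicles _dom
  unfold Spec_decode_routes decode_routes decode_routes_alt
  by_cases hv : permutation.filter (fun i => decide (1 ≤ i) && decide (i < (demands.length : Int))) = []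
  · simp [hv]
  · rw [if_neg hv, if_neg hv]
    set valid := permutation.filter (fun i => decide (1 ≤ i) && decide (i < (demands.length : Int))) with hvald
    set G := pvGroupRec demands capacity valid [] 0 with hG
    have hfoldc : ((PySem.List.enumerate valid 0).foldl (pvCutStep demands capacity) ([], 0)).1 =
        pvCutsRec demands capacity valid 0 0 := by
      rw [pvFoldCuts]
      exact List.nil_append _
    have hpw : List.Pairwise (· ≤ ·) ((0 : Int) :: pvCutsRec demands capacity valid 0 0) := by
      rw [List.pairwise_cons]
      exact ⟨fun c hc => pvCutsRec_ge demands capacity valid 0 0 c hc,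
        pvCutsRec_pairwise demands capacity valid 0 0⟩
    have hzip : List.zipWith (fun i j => PySem.List.slice valid (some i) (some j))
        ((0 : Int) :: pvCutsRec demands capacity valid 0 0 ++ [(valid.length : Int)])
        (pvCutsRec demands capacity valid 0 0 ++ [(valid.length : Int)]) = G := by
      rw [pvZip_slices valid (pvCutsRec demands capacity valid 0 0) 0 le_rfl hpw]
      simpa using pvSlices_cuts demands capacity valid 0 0
    have hzipfull : List.zipWith (fun i j => PySem.List.slice valid (some i) (some j))
        ((0 : Int) :: ((PySem.List.enumerate valid 0).foldl (pvCutStep demands capacity) ([], 0)).1 ++ [(valid.length : Int)])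
        (((0 : Int) :: ((PySem.List.enumerate valid 0).foldl (pvCutStep demands capacity) ([], 0)).1 ++ [(valid.length : Int)]).tail) = G := by
      rw [hfoldc]
      exact hzip
    have hfoldA :
        (valid.foldl (pvStepA demands capacity) ([], [0], 0)).1 ++
            [(valid.foldl (pvStepA demands capacity) ([], [0], 0)).2.1 ++ [0]] =
          G.map pvFmt := by
      have := pvFoldA_groupRec demands capacity valid [] [] 0
      simpa using this
    have hmerge : pvMergeG max_vehicles G =
        (if ((G.length : Int) > max max_vehicles 1) then
          PySem.List.slice G none (some (max (max_vehicles - 1) 0)) ++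
            [(PySem.List.slice G (some (max (max_vehicles - 1) 0)) none).flatten]
        else G) := by
      have hk0 : (0 : Int) ≤ max (max_vehicles - 1) 0 := le_max_right _ _
      split_ifs with hg
      · rcases max_lt_iff.mp hg with ⟨ha, hb⟩
        have hg' : (G.length : Int) > max_vehicles ∧ G.length ≥ 2 := ⟨ha, by omega⟩
        rw [pvMergeG_closed max_vehicles G hg',
          PySem.List.slice_to G hk0, PySem.List.slice_from G hk0]
        have hmx : (max (max_vehicles - 1) 0).toNat = (max_vehicles - 1).toNat := by
          rcases le_total 0 (max_vehicles - 1) with h | h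
          · rw [max_eq_left h]
          · rw [max_eq_right h]
            omega
        rw [hmx]
      · rw [pvMergeG, dif_neg ?_]
        intro hcon
        exact hg (max_lt_iff.mpr ⟨hcon.1, by omega⟩)
    simp only [hzipfull, hfoldA]
    rw [pvMergeA_fmt, hmerge, pvFilter_fmt]
    rfl
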